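-- pv_equiv track=rewrite | github.com/sigmaith/Problem-Solving | 프로그래머스/0/120896. 한 번만 등장한 문자/한 번만 등장한 문자.py | solution
-- ===== SOURCE A (Python) =====
-- def solution(s):
--     answer = ''
--     l = []
--     for i in range(0, len(s)):
--         flag = 1
--         for j in range(0, len(s)):
--             if i != j and s[i] == s[j]:
--                 flag = 0
--         if flag:
--             l.append(s[i])
--     l.sort()
--     for c in l:
--         answer += c
--
--     return answer
-- ===== SOURCE B (Python) =====
-- def solution(s):
--     t = sorted(s)
--     out = []
--     while t:
--         c = t[0]
--         k = 1
--         while k < len(t) and t[k] == c: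
--             k += 1
--         if k == 1:
--             out.append(c)
--         t = t[k:]
--     return ''.join(out)
-- ===== Notes on version B (the rewrite author's own statement) =====
-- stated objective: faster
-- what changed: A tests each position against every other position with two nested index loops and then sorts the survivors; B sorts the characters once and makes a single pass over the sorted list, collecting runs of equal characters and keeping the keys of length-1 runs.
import Mathlib
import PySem

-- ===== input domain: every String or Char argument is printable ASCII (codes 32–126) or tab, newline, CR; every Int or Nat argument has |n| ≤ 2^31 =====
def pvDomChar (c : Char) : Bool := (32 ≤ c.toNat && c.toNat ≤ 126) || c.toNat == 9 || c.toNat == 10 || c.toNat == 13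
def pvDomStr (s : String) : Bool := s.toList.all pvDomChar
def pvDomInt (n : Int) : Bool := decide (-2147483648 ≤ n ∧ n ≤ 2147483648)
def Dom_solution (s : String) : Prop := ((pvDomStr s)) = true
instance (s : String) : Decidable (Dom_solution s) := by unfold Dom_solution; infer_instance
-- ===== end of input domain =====

-- B replaces A's nested index scans with one sort followed by a single run-grouping pass (objective: faster).

-- ===== PORT A =====
def solution (s : String) : String :=
  let cs := s.toList
  let l : List Char :=
    (PySem.List.pyRange 0 (cs.length : Int) 1).foldl (fun l i =>
      let flag : Int :=
        (PySem.List.pyRange 0 (cs.length : Int) 1).foldl (fun flag j =>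
          if i ≠ j ∧ PySem.List.pyGetD cs i ' ' = PySem.List.pyGetD cs j ' ' then 0 else flag) 1
      if flag ≠ 0 then l ++ [PySem.List.pyGetD cs i ' '] else l) []
  let ls := PySem.List.sorted l (fun c => c.toNat)
  String.ofList (ls.foldl (fun answer c => answer ++ [c]) [])

-- ===== PORT B =====
-- inner `while k < len(t) and t[k] == c: k += 1` of Source B
def bRunEnd (t : List Char) (c : Char) (k : Nat) : Nat :=
  if h : k < t.length ∧ t.getD k ' ' = c then bRunEnd t c (k + 1) else k
termination_by t.length - k
decreasing_by omega

-- needed by bLoop's termination proof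
theorem le_bRunEnd (t : List Char) (c : Char) (k : Nat) : k ≤ bRunEnd t c k := by
  fun_induction bRunEnd t c k with
  | case1 => omega
  | case2 => omega

-- outer `while t:` loop of Source B (out is the accumulated `out` list)
def bLoop (t : List Char) (out : List Char) : List Char :=
  match t with
  | [] => out
  | c :: rest =>
    let k := bRunEnd (c :: rest) c 1
    bLoop ((c :: rest).drop k) (if k = 1 then out ++ [c] else out)
termination_by t.length
decreasing_by
  have := le_bRunEnd (c :: rest) c 1
  simp only [List.length_drop]
  simp only [List.length_cons]
  omega

def solution_alt (s : String) : String :=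
  let t := PySem.List.sorted s.toList (fun c => c.toNat)
  String.ofList (bLoop t [])

-- ===== PRECONDITION & SPEC =====
def Spec_solution (s : String) (out : String) : Prop := out = solution_alt s
instance (s : String) (out : String) : Decidable (Spec_solution s out) := by unfold Spec_solution; infer_instance

-- ===== CLAIM (what is proved, stated in full; the proofs are below) =====
def Claim_equal_solution : Prop := ∀ (s : String), Dom_solution s → Spec_solution s (solution s)

-- ===== LEMMAS AND PROOFS =====

-- A's inner flag loop: flag stays b unless some j satisfies the test
theorem flag_fold {α : Type} (L : List α) (Q : α → Prop) [DecidablePred Q] (b : Int) :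
    L.foldl (fun flag j => if Q j then 0 else flag) b = if ∀ j ∈ L, ¬ Q j then b else 0 := by
  induction L generalizing b with
  | nil => simp
  | cons x xs ih =>
    simp only [List.foldl_cons, ih]
    by_cases h : Q x <;> simp [h]

theorem map_getD_range (cs : List Char) (d : Char) :
    (List.range cs.length).map (fun k => cs.getD k d) = cs := by
  apply List.ext_getElem <;> simp [List.getD_eq_getElem?_getD]
  intro i h _; rw [List.getElem?_eq_getElem h]; rfl

-- counting equal characters by index equals List.count
theorem count_indices (cs : List Char) (c d : Char) :
    (List.range cs.length).countP (fun j => cs.getD j d == c) = cs.count c := by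
  conv_rhs => rw [← map_getD_range cs d]
  rw [List.count_eq_countP, List.countP_map]
  simp [Function.comp_def]

-- "some other index holds the same character" iff the character's count is not 1
theorem exists_other_iff (cs : List Char) (d : Char) (k : Nat) (hk : k < cs.length) :
    (∃ j ∈ List.range cs.length, j ≠ k ∧ cs.getD j d = cs.getD k d) ↔ cs.count (cs.getD k d) ≠ 1 := by
  have hmem : k ∈ List.range cs.length := List.mem_range.mpr hk
  have hperm := List.perm_cons_erase hmem
  have hnd : (List.range cs.length).Nodup := List.nodup_range
  rw [← count_indices cs (cs.getD k d) d, hperm.countP_eq]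
  simp only [List.countP_cons, beq_self_eq_true, if_pos]
  constructor
  · rintro ⟨j, hj, hjk, he⟩ h1
    have : j ∈ (List.range cs.length).erase k := (hnd.mem_erase_iff).mpr ⟨hjk, hj⟩
    have h0 : ((List.range cs.length).erase k).countP (fun j => cs.getD j d == cs.getD k d) = 0 := by omega
    exact (List.countP_eq_zero.mp h0) j this (by simpa using he)
  · intro hne
    have hcne : ((List.range cs.length).erase k).countP (fun j => cs.getD j d == cs.getD k d) ≠ 0 := by
      simp at hne ⊢; omega
    have hex : ∃ x ∈ (List.range cs.length).erase k, (fun j => cs.getD j d == cs.getD k d) x := by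
      by_contra hno
      push Not at hno
      exact hcne (List.countP_eq_zero.mpr (by simpa using hno))
    obtain ⟨j, hj, he⟩ := hex
    obtain ⟨hjk, hjr⟩ := hnd.mem_erase_iff.mp hj
    exact ⟨j, hjr, hjk, by simpa using he⟩

-- A's collected list l is the unique-count filter of s, in input order
theorem portA_list (cs : List Char) :
    (PySem.List.pyRange 0 (cs.length : Int) 1).foldl (fun l i =>
        if ((PySem.List.pyRange 0 (cs.length : Int) 1).foldl (fun flag j =>
              if i ≠ j ∧ PySem.List.pyGetD cs i ' ' = PySem.List.pyGetD cs j ' ' then (0 : Int) else flag) 1) ≠ 0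
        then l ++ [PySem.List.pyGetD cs i ' '] else l) []
      = cs.filter (fun c => decide (cs.count c = 1)) := by
  simp only [PySem.List.pyRange_zero_nat, List.foldl_map, PySem.List.pyGetD_natCast]
  rw [PySem.List.foldl_congr_mem _ _
      (fun l k => if cs.count (cs.getD k ' ') = 1 then l ++ [cs.getD k ' '] else l) []
      (by
        intro acc k hk
        have hk' : k < cs.length := List.mem_range.mp hk
        rw [flag_fold]
        have hiff : (∀ j ∈ List.range cs.length, ¬((k:Int) ≠ (j:Int) ∧ cs.getD k ' ' = cs.getD j ' '))
            ↔ cs.count (cs.getD k ' ') = 1 := by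
          rw [← not_iff_not, not_forall₂]
          push Not
          rw [← exists_other_iff cs ' ' k hk']
          constructor
          · rintro ⟨j, hj, h1, h2⟩
            exact ⟨j, hj, fun he => h1 (by rw [he]), h2.symm⟩
          · rintro ⟨j, hj, h1, h2⟩
            exact ⟨j, hj, fun he => h1 (by exact_mod_cast he.symm), h2.symm⟩
        by_cases hc : cs.count (cs.getD k ' ') = 1
        · rw [if_pos (hiff.mpr hc)]
          show (if (1:Int) ≠ 0 then acc ++ [cs.getD k ' '] else acc)
              = if cs.count (cs.getD k ' ') = 1 then acc ++ [cs.getD k ' '] else acc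
          rw [if_pos hc, if_pos (by norm_num)]
        · rw [if_neg (fun h => hc (hiff.mp h))]
          show acc = if cs.count (cs.getD k ' ') = 1 then acc ++ [cs.getD k ' '] else acc
          rw [if_neg hc])]
  have H : ∀ (p : Char → Prop), ∀ _ : DecidablePred p,
      List.foldl (fun (acc : List Char) (c : Char) => if p c then acc ++ [c] else acc) [] cs
      = List.foldl (fun l k => if p (cs.getD k ' ') then l ++ [cs.getD k ' '] else l) [] (List.range cs.length) := by
    intro p _
    conv_lhs => rw [← map_getD_range cs ' ']
    rw [List.foldl_map]
  have H := H (fun c => cs.count c = 1) (by infer_instance)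
  rw [← H, PySem.List.foldl_append_ite_eq_filter]
  rfl

-- Source B's inner while advances exactly over the run of characters equal to c
theorem bRunEnd_eq (t : List Char) (c : Char) (k : Nat) :
    bRunEnd t c k = k + ((t.drop k).takeWhile (fun x => x == c)).length := by
  fun_induction bRunEnd t c k with
  | case1 k h ih =>
    obtain ⟨hk, he⟩ := h
    rw [ih, List.drop_eq_getElem_cons hk]
    have hg : t.getD k ' ' = t[k] := by
      rw [List.getD_eq_getElem?_getD, List.getElem?_eq_getElem hk]; rfl
    rw [hg] at he
    simp [he]
    omega
  | case2 k h =>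
    rcases Nat.lt_or_ge k t.length with hk | hk
    · have he : ¬ t.getD k ' ' = c := fun hc => h ⟨hk, hc⟩
      have hg : t.getD k ' ' = t[k] := by
        rw [List.getD_eq_getElem?_getD, List.getElem?_eq_getElem hk]; rfl
      rw [hg] at he
      rw [List.drop_eq_getElem_cons hk]
      simp [he]
    · rw [List.drop_eq_nil_of_le hk]; simp

theorem drop_len_takeWhile (p : Char → Bool) (l : List Char) :
    l.drop (l.takeWhile p).length = l.dropWhile p := by
  induction l with
  | nil => rfl
  | cons x xs ih => by_cases h : p x <;> simp [h, ih]

theorem char_lt_of_le_ne (a b : Char) (h1 : a.toNat ≤ b.toNat) (h2 : a ≠ b) : a.toNat < b.toNat := by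
  rcases Nat.lt_or_ge a.toNat b.toNat with h | h
  · exact h
  · have : a.toNat = b.toNat := by omega
    exact absurd (Char.ext (UInt32.toNat_inj.mp this)) h2

-- on a sorted list, everything after the dropped run differs from the run's character
theorem not_mem_dropWhile (c : Char) (rest : List Char)
    (hp : (c :: rest).Pairwise (fun a b => a.toNat ≤ b.toNat)) :
    c ∉ rest.dropWhile (fun x => x == c) := by
  cases hdw : rest.dropWhile (fun x => x == c) with
  | nil => simp
  | cons d dw' =>
    have hdne : ¬ (d == c) = true := by
      have := List.head?_dropWhile_not (fun x => x == c) rest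
      rw [hdw] at this; simpa using this
    have hdne' : d ≠ c := by simpa using hdne
    have hsub : (d :: dw').Sublist rest := hdw ▸ List.dropWhile_sublist _
    have hrest : rest.Pairwise (fun a b => a.toNat ≤ b.toNat) := (List.pairwise_cons.mp hp).2
    have hcle : ∀ x ∈ rest, c.toNat ≤ x.toNat := (List.pairwise_cons.mp hp).1
    have hdd : (d :: dw').Pairwise (fun a b => a.toNat ≤ b.toNat) := List.Pairwise.sublist hsub hrest
    intro hmem
    rcases List.mem_cons.mp hmem with h | h
    · exact hdne' (h.symm)
    · have h1 : d.toNat ≤ c.toNat := by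
        have := (List.pairwise_cons.mp hdd).1 c h; simpa using this
      have h2 : c.toNat ≤ d.toNat := hcle d (hsub.subset (List.mem_cons_self))
      exact hdne' (Char.ext (UInt32.toNat_inj.mp (Nat.le_antisymm h1 h2)))

-- B's run loop on a sorted list collects exactly the characters of count 1, in order
theorem bLoop_sorted (n : Nat) : ∀ (t : List Char), t.length ≤ n →
    t.Pairwise (fun a b => a.toNat ≤ b.toNat) → ∀ (out : List Char),
    bLoop t out = out ++ t.filter (fun c => decide (t.count c = 1)) := by
  induction n with
  | zero =>
    intro t ht _ out
    have : t = [] := List.eq_nil_of_length_eq_zero (by omega)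
    subst this; simp [bLoop]
  | succ n ih =>
    intro t ht hp out
    cases t with
    | nil => simp [bLoop]
    | cons c rest =>
      set q : Char → Bool := fun x => x == c with hq
      set tw := rest.takeWhile q with htw
      set dw := rest.dropWhile q with hdw
      have hk : bRunEnd (c :: rest) c 1 = 1 + tw.length := by
        rw [bRunEnd_eq]; simp [htw, hq]
      have hdrop : (c :: rest).drop (1 + tw.length) = dw := by
        have h1 : (c :: rest).drop (1 + tw.length) = rest.drop tw.length := by
          rw [Nat.add_comm, List.drop_succ_cons]
        rw [h1, htw, hdw, drop_len_takeWhile]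
      have hsplit : rest = tw ++ dw := (List.takeWhile_append_dropWhile (p := q) (l := rest)).symm
      have htwc : ∀ x ∈ tw, x = c := by
        intro x hx
        have := List.mem_takeWhile_imp hx
        simpa [hq] using this
      have hcdw : c ∉ dw := not_mem_dropWhile c rest hp
      have hcount_tw : tw.count c = tw.length := by
        rw [List.count_eq_length]
        intro b hb; rw [htwc b hb]
      have hcount_c : (c :: rest).count c = 1 + tw.length := by
        rw [hsplit, List.count_cons, List.count_append, List.count_eq_zero.mpr hcdw]
        simp [hcount_tw, Nat.add_comm]
      have hxne : ∀ x ∈ dw, x ≠ c := fun x hx he => hcdw (he ▸ hx)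
      have hcount_dw : ∀ x ∈ dw, (c :: rest).count x = dw.count x := by
        intro x hx
        have hxc := hxne x hx
        have hxtw : x ∉ tw := fun hxt => hxc (htwc x hxt)
        rw [hsplit, List.count_cons, List.count_append]
        rw [List.count_eq_zero.mpr hxtw]
        simp [Ne.symm hxc]
      have hdw_sub : dw.Sublist rest := List.dropWhile_sublist _
      have hdw_pair : dw.Pairwise (fun a b => a.toNat ≤ b.toNat) :=
        List.Pairwise.sublist hdw_sub (List.pairwise_cons.mp hp).2
      have hdw_len : dw.length ≤ n := by
        have := hdw_sub.length_le
        simp at ht; omega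
      -- one step of bLoop, then the induction hypothesis on the remaining sorted tail
      rw [bLoop]
      simp only [hk, hdrop]
      rw [ih dw hdw_len hdw_pair]
      have hfil_dw : dw.filter (fun x => decide ((c :: rest).count x = 1))
          = dw.filter (fun x => decide (dw.count x = 1)) := by
        apply List.filter_congr
        intro x hx; rw [hcount_dw x hx]
      have hfil_tw : tw.filter (fun x => decide ((c :: rest).count x = 1)) = [] := by
        rw [List.filter_eq_nil_iff]
        intro x hx
        rw [htwc x hx, hcount_c]
        have hne : tw ≠ [] := by intro h; rw [h] at hx; cases hx
        have : 0 < tw.length := List.length_pos_iff.mpr hne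
        simp; omega
      have hgen : ∀ (P : Char → Bool), (c :: rest).filter P
          = (if P c then [c] else []) ++ (tw.filter P ++ dw.filter P) := by
        intro P
        conv_lhs => rw [hsplit]
        rw [List.filter_cons, List.filter_append]
        by_cases h : P c <;> simp [h]
      rw [hgen, hfil_dw, hfil_tw]
      by_cases hm : tw.length = 0
      · have hPc : (decide ((c :: rest).count c = 1)) = true := by
          rw [hcount_c]; simp [hm]
        have hk1 : 1 + tw.length = 1 := by omega
        rw [if_pos hk1, hPc]
        simp
      · have hPc : (decide ((c :: rest).count c = 1)) = false := by
          rw [hcount_c]; simp only [decide_eq_false_iff_not]; omega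
        have hk1 : ¬ (1 + tw.length = 1) := by omega
        rw [if_neg hk1, hPc]
        simp

-- sorting A's filtered list equals filtering B's sorted list
theorem sorted_filter_eq (cs : List Char) :
    PySem.List.sorted (cs.filter (fun c => decide (cs.count c = 1))) (fun c => c.toNat)
      = (PySem.List.sorted cs (fun c => c.toNat)).filter
          (fun c => decide ((PySem.List.sorted cs (fun c => c.toNat)).count c = 1)) := by
  set t := PySem.List.sorted cs (fun c => c.toNat) with hT
  have hperm : t.Perm cs := PySem.List.sorted_perm cs (fun c => c.toNat) false
  have hfeq : t.filter (fun c => decide (t.count c = 1))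
      = t.filter (fun c => decide (cs.count c = 1)) :=
    List.filter_congr (fun x _ => by rw [hperm.count_eq])
  apply PySem.List.sorted_eq_of_perm_of_pairwise_lt
  · rw [hfeq]; exact hperm.filter _
  · have hple : t.Pairwise (fun a b => a.toNat ≤ b.toNat) :=
      PySem.List.sorted_pairwise cs (fun c => c.toNat)
    have h1 := hple.filter (fun c => decide (t.count c = 1))
    have hnd : (t.filter (fun c => decide (t.count c = 1))).Nodup := by
      rw [List.nodup_iff_count]
      intro a
      by_cases h : t.count a = 1
      · rw [List.count_filter (by simpa using h)]
        omega
      · have hnm : a ∉ t.filter (fun c => decide (t.count c = 1)) := by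
          intro hmem
          exact h (by simpa using (List.mem_filter.mp hmem).2)
        rw [List.count_eq_zero.mpr hnm]
        omega
    exact (h1.and hnd).imp (fun {a b} h => char_lt_of_le_ne a b h.1 h.2)

-- ===== VERDICT (by name: the statement is the Claim_ definition above) =====
theorem solution_spec : Claim_equal_solution := by
  intro s _
  unfold Spec_solution
  simp only [solution, solution_alt]
  rw [portA_list s.toList, PySem.List.foldl_append_singleton, sorted_filter_eq]
  rw [bLoop_sorted (PySem.List.sorted s.toList (fun c => c.toNat)).length _ le_rfl
      (PySem.List.sorted_pairwise s.toList (fun c => c.toNat)) []]
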